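-- pv_equiv track=rewrite | github.com/Mutum/DSA | recursion/exercise.py | find_all_uppercase
-- ===== SOURCE A (Python) =====
-- def find_all_uppercase(input_str, indx=0, result=None):
--     # Initialize result list on first call
--     if result is None:
--         result = []
--
--     # Base case: if we've reached the end of the string
--     if indx >= len(input_str):
--         return result
--
--     # If current character is uppercase, add it to result
--     if input_str[indx].isupper():
--         result.append(input_str[indx])
--
--     # Always continue to next character (no early return)
--     return find_all_uppercase(input_str, indx+1, result)
-- ===== SOURCE B (Python) =====
-- def find_all_uppercase(input_str, indx=0, result=None):
--     # Slice off the part to scan, filter its uppercase characters, and extend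
--     # the caller-supplied result list in place (returning that same list).
--     if result is None:
--         result = []
--     result.extend(c for c in input_str[indx:] if c.isupper())
--     return result
-- ===== Notes on version B (the rewrite author's own statement) =====
-- stated objective: simpler
-- what changed: Replaces the per-character tail recursion with a single slice-then-filter expression (input_str[indx:] filtered by isupper, extended onto result).
-- intended difference: For a negative start offset -len(s) <= indx < 0 on a string containing an uppercase letter, A's negative indexing wraps around and, after reaching index 0, rescans the whole string, returning the uppercase letters of s[indx:] followed by those of all of s; B returns only the uppercase letters of s[indx:], the intended meaning of a start offset. — e.g. on find_all_uppercase("A", -1, none): A returns ["A", "A"], B returns ["A"]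
import Mathlib
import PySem

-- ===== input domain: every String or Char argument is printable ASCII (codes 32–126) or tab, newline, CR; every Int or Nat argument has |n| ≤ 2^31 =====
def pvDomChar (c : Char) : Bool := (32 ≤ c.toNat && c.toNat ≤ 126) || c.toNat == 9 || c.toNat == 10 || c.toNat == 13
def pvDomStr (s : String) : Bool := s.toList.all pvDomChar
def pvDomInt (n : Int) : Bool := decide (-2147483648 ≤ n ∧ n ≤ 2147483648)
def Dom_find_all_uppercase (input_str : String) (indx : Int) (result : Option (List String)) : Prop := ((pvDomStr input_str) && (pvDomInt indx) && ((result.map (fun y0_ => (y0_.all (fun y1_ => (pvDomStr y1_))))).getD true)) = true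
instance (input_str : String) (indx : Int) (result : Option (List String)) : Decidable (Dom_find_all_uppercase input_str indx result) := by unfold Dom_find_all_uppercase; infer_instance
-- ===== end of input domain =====

-- B replaces A's per-character tail recursion by one slice-then-filter expression;
-- both append to the caller-supplied result list in place, so side effects coincide.
-- Equivalence is proved outside D_ (A's negative-index wraparound rescan, documented below).


-- ===== PORT A =====
-- Literal transliteration of A's tail recursion; the `none => r` branch is where the
-- Python raises IndexError (indx < -len), excluded by Pre_ below.
def find_all_uppercase (input_str : String) (indx : Int) (result : Option (List String)) : List String :=
  let r := result.getD []
  if h : indx ≥ PySem.Str.len input_str then r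
  else
    match PySem.Str.pyGet? input_str indx with
    | none => r
    | some c =>
      find_all_uppercase input_str (indx + 1)
        (some (if PySem.Chars.isupper c then r ++ [String.ofList [c]] else r))
termination_by (PySem.Str.len input_str - indx).toNat
decreasing_by omega

-- ===== PORT B =====
-- Literal transliteration of B: result ++ uppercase characters of the slice input_str[indx:].
def find_all_uppercase_alt (input_str : String) (indx : Int) (result : Option (List String)) : List String :=
  let r := result.getD []
  r ++ ((PySem.List.slice input_str.toList (some indx) none).filter
          PySem.Chars.isupper).map (fun c => String.ofList [c])

-- ===== PRECONDITION & SPEC =====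
-- Pre_ excludes exactly the inputs where the Python A raises IndexError: indx < -len(input_str).
def Pre_find_all_uppercase (input_str : String) (indx : Int) (result : Option (List String)) : Prop :=
  -(PySem.Str.len input_str) ≤ indx
instance (input_str : String) (indx : Int) (result : Option (List String)) : Decidable (Pre_find_all_uppercase input_str indx result) := by unfold Pre_find_all_uppercase; infer_instance

def pvWitness_find_all_uppercase : String × Int × Option (List String) := ("Hello World", 0, none)

-- For -len(s) ≤ indx < 0 on a string containing an uppercase letter, A's negative indexing
-- wraps around and, after reaching index 0, rescans the whole string — returning the uppercase
-- letters of s[indx:] followed by those of ALL of s; B returns only the uppercase letters of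
-- s[indx:], the intended meaning of a start offset.
def D_find_all_uppercase (input_str : String) (indx : Int) (result : Option (List String)) : Prop :=
  -(PySem.Str.len input_str) ≤ indx ∧ indx < 0 ∧
    input_str.toList.any PySem.Chars.isupper = true
instance (input_str : String) (indx : Int) (result : Option (List String)) : Decidable (D_find_all_uppercase input_str indx result) := by unfold D_find_all_uppercase; infer_instance

def Spec_find_all_uppercase (input_str : String) (indx : Int) (result : Option (List String)) (out : List String) : Prop := ¬ D_find_all_uppercase input_str indx result → out = find_all_uppercase_alt input_str indx result
instance (input_str : String) (indx : Int) (result : Option (List String)) (out : List String) : Decidable (Spec_find_all_uppercase input_str indx result out) := by unfold Spec_find_all_uppercase; infer_instance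

def pvDiffWitness_find_all_uppercase : String × Int × Option (List String) := ("A", -1, none)
def pvDiffWitnessOut_find_all_uppercase : (List String) × (List String) := (["A", "A"], ["A"])

-- ===== CLAIM (what is proved, stated in full; the proofs are below) =====
def Claim_unchanged_find_all_uppercase : Prop := ∀ (input_str : String) (indx : Int) (result : Option (List String)), Dom_find_all_uppercase input_str indx result → Pre_find_all_uppercase input_str indx result → Spec_find_all_uppercase input_str indx result (find_all_uppercase input_str indx result)
def Claim_changed_find_all_uppercase : Prop := Dom_find_all_uppercase (pvDiffWitness_find_all_uppercase.1) (pvDiffWitness_find_all_uppercase.2.1) (pvDiffWitness_find_all_uppercase.2.2) ∧ Pre_find_all_uppercase (pvDiffWitness_find_all_uppercase.1) (pvDiffWitness_find_all_uppercase.2.1) (pvDiffWitness_find_all_uppercase.2.2) ∧ D_find_all_uppercase (pvDiffWitness_find_all_uppercase.1) (pvDiffWitness_find_all_uppercase.2.1) (pvDiffWitness_find_all_uppercase.2.2) ∧ find_all_uppercase (pvDiffWitness_find_all_uppercase.1) (pvDiffWitness_find_all_uppercase.2.1) (pvDiffWitness_find_all_uppercase.2.2) = pvDiffWitnessOut_find_all_uppercase.1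 ∧ find_all_uppercase_alt (pvDiffWitness_find_all_uppercase.1) (pvDiffWitness_find_all_uppercase.2.1) (pvDiffWitness_find_all_uppercase.2.2) = pvDiffWitnessOut_find_all_uppercase.2 ∧ pvDiffWitnessOut_find_all_uppercase.1 ≠ pvDiffWitnessOut_find_all_uppercase.2
def Claim_exact_find_all_uppercase : Prop := ∀ (input_str : String) (indx : Int) (result : Option (List String)), Dom_find_all_uppercase input_str indx result → Pre_find_all_uppercase input_str indx result → D_find_all_uppercase input_str indx result → find_all_uppercase input_str indx result ≠ find_all_uppercase_alt input_str indx result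

-- ===== LEMMAS AND PROOFS =====

-- A's recursion from a nonnegative index collects the uppercase characters of the tail.
lemma findA_nonneg (s : String) :
    ∀ (n : Nat) (indx : Int), (PySem.Str.len s - indx).toNat ≤ n → 0 ≤ indx →
    ∀ (r : List String),
    find_all_uppercase s indx (some r) =
      r ++ ((s.toList.drop indx.toNat).filter PySem.Chars.isupper).map
            (fun c => String.ofList [c]) := by
  intro n
  induction n with
  | zero =>
    intro indx hn h0 r
    have hge : indx ≥ PySem.Str.len s := by omega
    have hlen := PySem.Str.len_eq s
    rw [find_all_uppercase, dif_pos hge, List.drop_eq_nil_of_le (by omega)]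
    simp
  | succ n ih =>
    intro indx hn h0 r
    by_cases hge : indx ≥ PySem.Str.len s
    · have hlen := PySem.Str.len_eq s
      rw [find_all_uppercase, dif_pos hge, List.drop_eq_nil_of_le (by omega)]
      simp
    · have hlen := PySem.Str.len_eq s
      have hlt : indx.toNat < s.toList.length := by omega
      have hget : PySem.Str.pyGet? s indx = some s.toList[indx.toNat] := by
        simp only [PySem.Str.pyGet?, PySem.Chars.pyGet?]
        exact PySem.List.pyGet?_eq_some_getElem s.toList h0 (by omega)
      have hdrop : s.toList.drop indx.toNat =
          s.toList[indx.toNat] :: s.toList.drop (indx.toNat + 1) :=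
        List.drop_eq_getElem_cons hlt
      rw [find_all_uppercase, dif_neg hge]
      simp only [hget, Option.getD_some]
      rw [ih (indx + 1) (by omega) (by omega)]
      have h1 : (indx + 1).toNat = indx.toNat + 1 := by omega
      rw [h1, hdrop, List.filter_cons]
      by_cases hu : PySem.Chars.isupper s.toList[indx.toNat] = true
      · simp [hu]
      · simp [hu]

-- From a valid negative index, A processes the wrapped tail and falls through to index 0.
lemma findA_neg (s : String) :
    ∀ (n : Nat) (indx : Int), (-indx).toNat ≤ n → -(PySem.Str.len s) ≤ indx → indx ≤ 0 →
    ∀ (r : List String),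
    find_all_uppercase s indx (some r) =
      find_all_uppercase s 0
        (some (r ++ ((s.toList.drop (s.toList.length + indx).toNat).filter
              PySem.Chars.isupper).map (fun c => String.ofList [c]))) := by
  intro n
  induction n with
  | zero =>
    intro indx hn hlo hhi r
    have h0 : indx = 0 := by omega
    subst h0
    have hd : (((s.toList.length : Int)) + 0).toNat = s.toList.length := by omega
    rw [hd, List.drop_length]
    simp
  | succ n ih =>
    intro indx hn hlo hhi r
    by_cases h0 : indx = 0
    · subst h0
      have hd : (((s.toList.length : Int)) + 0).toNat = s.toList.length := by omega
      rw [hd, List.drop_length]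
      simp
    · have hlen := PySem.Str.len_eq s
      have hneg : indx < 0 := by omega
      have hge : ¬ indx ≥ PySem.Str.len s := by omega
      have hidx : (s.toList.length + indx).toNat < s.toList.length := by omega
      have hk : indx = -(((-indx).toNat : Nat) : Int) := by omega
      have hpy : PySem.List.pyGet? s.toList indx =
          s.toList[s.toList.length - (-indx).toNat]? := by
        conv_lhs => rw [hk]
        exact PySem.List.pyGet?_neg_natCast s.toList (-indx).toNat (by omega) (by omega)
      have hidx2 : s.toList.length - (-indx).toNat = (s.toList.length + indx).toNat := by omega
      obtain ⟨c, hc⟩ : ∃ c, s.toList[(s.toList.length + indx).toNat]? = some c :=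
        ⟨_, List.getElem?_eq_getElem hidx⟩
      have hce : s.toList[(s.toList.length + indx).toNat] = c :=
        Option.some.inj ((List.getElem?_eq_getElem hidx).symm.trans hc)
      have hget : PySem.Str.pyGet? s indx = some c := by
        simp only [PySem.Str.pyGet?, PySem.Chars.pyGet?]
        rw [hpy, hidx2, hc]
      have hdrop : s.toList.drop (s.toList.length + indx).toNat =
          c :: s.toList.drop ((s.toList.length + indx).toNat + 1) := by
        rw [List.drop_eq_getElem_cons hidx, hce]
      rw [find_all_uppercase, dif_neg hge]
      simp only [hget, Option.getD_some]
      rw [ih (indx + 1) (by omega) (by omega) (by omega)]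
      have h1 : (s.toList.length + (indx + 1)).toNat = (s.toList.length + indx).toNat + 1 := by
        omega
      rw [h1, hdrop, List.filter_cons]
      by_cases hu : PySem.Chars.isupper c = true
      · simp [hu]
      · simp [hu]

-- The result parameter only enters through result.getD [].
lemma findA_some_getD (s : String) (indx : Int) (result : Option (List String)) :
    find_all_uppercase s indx result = find_all_uppercase s indx (some (result.getD [])) := by
  rw [find_all_uppercase, find_all_uppercase]
  simp

-- ===== VERDICT (by name: the statement is the Claim_ definition above) =====
theorem find_all_uppercase_spec : Claim_unchanged_find_all_uppercase := by
  intro s indx result _ hpre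
  unfold Spec_find_all_uppercase D_find_all_uppercase
  intro hnD
  have hlen := PySem.Str.len_eq s
  unfold Pre_find_all_uppercase at hpre
  rw [findA_some_getD]
  unfold find_all_uppercase_alt
  by_cases h0 : 0 ≤ indx
  · rw [findA_nonneg s (PySem.Str.len s - indx).toNat indx le_rfl h0,
      PySem.List.slice_from s.toList h0]
  · -- negative indx inside Pre_: ¬D_ forces no uppercase character at all
    have hany : s.toList.any PySem.Chars.isupper = false := by
      rcases Bool.eq_false_or_eq_true (s.toList.any PySem.Chars.isupper) with h | h
      · exact absurd ⟨hpre, by omega, h⟩ hnD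
      · exact h
    have hnoup : ∀ c ∈ s.toList, PySem.Chars.isupper c = false := by
      intro c hc
      rcases Bool.eq_false_or_eq_true (PySem.Chars.isupper c) with h | h
      · exact absurd (List.any_eq_true.mpr ⟨c, hc, h⟩) (by simp [hany])
      · exact h
    have hfilt : ∀ (l : List Char), (∀ c ∈ l, PySem.Chars.isupper c = false) →
        l.filter PySem.Chars.isupper = [] := by
      intro l hl
      simp only [List.filter_eq_nil_iff]
      intro c hc; simp [hl c hc]
    rw [findA_neg s (-indx).toNat indx le_rfl hpre (by omega),
      findA_nonneg s (PySem.Str.len s).toNat 0 (by omega) le_rfl]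
    rw [hfilt _ (fun c hc => hnoup c (List.mem_of_mem_drop hc)),
        hfilt _ (fun c hc => hnoup c (List.mem_of_mem_drop hc)),
        hfilt _ (fun c hc => hnoup c (PySem.List.mem_of_mem_slice _ _ _ hc))]
    simp

theorem find_all_uppercase_changed : Claim_changed_find_all_uppercase := by
  unfold Claim_changed_find_all_uppercase
  refine ⟨by decide, by decide, by decide, ?_, by decide, by decide⟩
  simp [pvDiffWitness_find_all_uppercase, pvDiffWitnessOut_find_all_uppercase,
    find_all_uppercase, PySem.List.pyGet?, PySem.List.pyIdx?, PySem.Chars.isupper]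

theorem find_all_uppercase_tight : Claim_exact_find_all_uppercase := by
  intro s indx result _ _ hD
  obtain ⟨hlo, hneg, hany⟩ := hD
  have hlen := PySem.Str.len_eq s
  rw [findA_some_getD,
    findA_neg s (-indx).toNat indx le_rfl hlo (by omega),
    findA_nonneg s (PySem.Str.len s).toNat 0 (by omega) le_rfl]
  unfold find_all_uppercase_alt
  intro heq
  apply_fun List.length at heq
  simp only [List.length_append, List.length_map, Int.toNat_zero, List.drop_zero] at heq
  obtain ⟨c, hc, hcu⟩ := List.any_eq_true.mp hany
  have hmem : c ∈ s.toList.filter PySem.Chars.isupper := List.mem_filter.mpr ⟨hc, hcu⟩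
  have hpos : 0 < (s.toList.filter PySem.Chars.isupper).length :=
    List.length_pos_of_mem hmem
  have hk : indx = -(((-indx).toNat : Nat) : Int) := by omega
  have hslice : PySem.List.slice s.toList (some indx) none =
      s.toList.drop (s.toList.length + indx).toNat := by
    rw [PySem.List.slice_some_none]
    congr 1
    conv_lhs => rw [hk]
    rw [PySem.List.clampIdx_neg_natCast s.toList.length (-indx).toNat (by omega)]
    omega
  rw [hslice] at heq
  omega
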